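-- pv_equiv track=rewrite | github.com/GeorgeDP97/Tarea-2---Generadores | Generadores   Jorge Manuel Domínguez 15153.py | trange
-- ===== SOURCE A (Python) =====
-- def trange(start, stop, step):
--     actual = list(start)
--     while actual < list(stop):
--         yield tuple(actual)
--         sec = step[2] + actual[2]
--         minc = 0
--         hrc = 0
--         if sec < 60:
--             actual[2] = sec
--         else:
--             actual[2] = sec - 60
--             minc = 1
--         mins = step[1] + actual[1] + minc
--         if mins < 60:
--             actual[1] = mins
--         else:
--             actual[1] = mins - 60
--             hrc = 1
--         hr = step[0] + actual[0] + hrc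
--         if hr < 24:
--             actual[0] = hr
--         else:
--             actual[0] = hr - 24
-- ===== SOURCE B (Python) =====
-- def trange(start, stop, step):
--     # Work on a single seconds-of-day counter instead of a digit triple:
--     # both start and step are folded to total seconds once, and each loop
--     # iteration is one modular addition plus a divmod decomposition.
--     s = (step[0] * 3600 + step[1] * 60 + step[2]) % 86400
--     t = start[0] * 3600 + start[1] * 60 + start[2]
--     while True:
--         h, r = divmod(t, 3600)
--         m, sec = divmod(r, 60)
--         cur = (h, m, sec)
--         if not (cur < tuple(stop)):
--             break
--         yield cur
--         t = (t + s) % 86400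
-- ===== Notes on version B (the rewrite author's own statement) =====
-- stated objective: alternative
-- what changed: B folds start and step into a single seconds-of-day integer once and advances it with one modular addition (% 86400) per iteration, decomposing it with divmod only to yield, instead of maintaining an (h,m,s) digit triple through three hand-unrolled subtract-once carry blocks.
-- outside the precondition, e.g. on trange((2, -60, 0), (1, 30, 0), (0, 30, 0)): A returns [], B returns [(1, 0, 0)]
import Mathlib
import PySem

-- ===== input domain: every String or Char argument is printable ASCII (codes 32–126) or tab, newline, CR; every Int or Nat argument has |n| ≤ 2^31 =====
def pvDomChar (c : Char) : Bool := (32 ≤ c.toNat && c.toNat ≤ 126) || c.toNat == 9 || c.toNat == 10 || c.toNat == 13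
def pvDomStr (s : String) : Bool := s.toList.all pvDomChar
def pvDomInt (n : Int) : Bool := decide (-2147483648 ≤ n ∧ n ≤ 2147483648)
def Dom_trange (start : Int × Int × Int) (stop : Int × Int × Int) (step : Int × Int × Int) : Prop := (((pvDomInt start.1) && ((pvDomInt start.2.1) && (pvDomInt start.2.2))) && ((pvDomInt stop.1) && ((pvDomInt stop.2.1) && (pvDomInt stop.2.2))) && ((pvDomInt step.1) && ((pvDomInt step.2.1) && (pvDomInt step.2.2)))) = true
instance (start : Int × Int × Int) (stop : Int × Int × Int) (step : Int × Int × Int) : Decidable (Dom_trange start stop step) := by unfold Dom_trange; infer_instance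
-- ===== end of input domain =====

-- B replaces A's (h,m,s) digit triple with three unrolled carry branches by a single
-- seconds-of-day counter advanced modulo 86400 and decomposed with divmod at each yield
-- (objective: alternative); equivalence is claimed on Pre_ (normalized, terminating inputs).

-- Python's lexicographic `<` on 3-element int lists/tuples (used by both ports).
def pvLexLt (a b : Int × Int × Int) : Bool :=
  decide (a.1 < b.1 ∨ (a.1 = b.1 ∧ (a.2.1 < b.2.1 ∨ (a.2.1 = b.2.1 ∧ a.2.2 < b.2.2))))

-- ===== PORT A =====
-- one iteration of A's loop body: the three copy-pasted carry blocks, in order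
def trangeStep (step actual : Int × Int × Int) : Int × Int × Int :=
  let sec := step.2.2 + actual.2.2
  let (a2, minc) := if sec < 60 then (sec, (0 : Int)) else (sec - 60, (1 : Int))
  let mins := step.2.1 + actual.2.1 + minc
  let (a1, hrc) := if mins < 60 then (mins, (0 : Int)) else (mins - 60, (1 : Int))
  let hr := step.1 + actual.1 + hrc
  (if hr < 24 then hr else hr - 24, a1, a2)

-- A's `while actual < list(stop)` loop; fuel bounds the iterations (Pre_ inputs need < 86400)
def trangeLoop (fuel : Nat) (stop step actual : Int × Int × Int) : List (Int × Int × Int) :=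
  match fuel with
  | 0 => []
  | Nat.succ f =>
      if pvLexLt actual stop then actual :: trangeLoop f stop step (trangeStep step actual)
      else []

def trange (start : Int × Int × Int) (stop : Int × Int × Int) (step : Int × Int × Int) : List (Int × Int × Int) :=
  trangeLoop 90000 stop step start

-- ===== PORT B =====
-- h, r = divmod(t, 3600); m, sec = divmod(r, 60); cur = (h, m, sec)
def pvTriple (t : Int) : Int × Int × Int :=
  let h := PySem.Int.floordiv t 3600
  let r := PySem.Int.mod t 3600
  (h, PySem.Int.floordiv r 60, PySem.Int.mod r 60)

def trangeAltLoop (fuel : Nat) (stop : Int × Int × Int) (s t : Int) : List (Int × Int × Int) :=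
  match fuel with
  | 0 => []
  | Nat.succ f =>
      let cur := pvTriple t
      if pvLexLt cur stop then cur :: trangeAltLoop f stop s (PySem.Int.mod (t + s) 86400)
      else []

def trange_alt (start : Int × Int × Int) (stop : Int × Int × Int) (step : Int × Int × Int) : List (Int × Int × Int) :=
  trangeAltLoop 90000 stop
    (PySem.Int.mod (step.1 * 3600 + step.2.1 * 60 + step.2.2) 86400)
    (start.1 * 3600 + start.2.1 * 60 + start.2.2)

-- ===== PRECONDITION & SPEC =====
def pvTotal (a : Int × Int × Int) : Int := a.1 * 3600 + a.2.1 * 60 + a.2.2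

def pvNorm (a : Int × Int × Int) : Prop :=
  0 ≤ a.1 ∧ a.1 < 24 ∧ 0 ≤ a.2.1 ∧ a.2.1 < 60 ∧ 0 ≤ a.2.2 ∧ a.2.2 < 60

-- number of normalized time triples lexicographically below `b`
def pvF (b : Int × Int × Int) : Int :=
  if 24 ≤ b.1 then 86400
  else if b.1 < 0 then 0
  else b.1 * 3600 +
    (if 60 ≤ b.2.1 then 3600
     else if b.2.1 < 0 then 0
     else b.2.1 * 60 + max 0 (min 60 b.2.2))

-- Pre_ restricts to the natural domain of the generator — either the loop is never
-- entered (by both guards), or start and step are normalized time triples and the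
-- gcd condition states exactly that A's loop terminates (some reachable second-of-day
-- value reaches pvF stop); outside it A either diverges or relies on un-normalized
-- carry arithmetic that B's modular counter intentionally does not reproduce.
def Pre_trange (start : Int × Int × Int) (stop : Int × Int × Int) (step : Int × Int × Int) : Prop :=
  (pvLexLt start stop = false ∧ pvLexLt (pvTriple (pvTotal start)) stop = false)
  ∨ (pvNorm start ∧ pvNorm step ∧
      pvF stop ≤ 86400 - (Int.gcd (pvTotal step) 86400 : Int)
                  + pvTotal start % (Int.gcd (pvTotal step) 86400 : Int))

instance (start : Int × Int × Int) (stop : Int × Int × Int) (step : Int × Int × Int) : Decidable (Pre_trange start stop step) := by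
  unfold Pre_trange pvNorm; infer_instance

def pvWitness_trange : (Int × Int × Int) × (Int × Int × Int) × (Int × Int × Int) :=
  ((0, 0, 0), (0, 1, 0), (0, 0, 30))

def Spec_trange (start : Int × Int × Int) (stop : Int × Int × Int) (step : Int × Int × Int) (out : List (Int × Int × Int)) : Prop := out = trange_alt start stop step
instance (start : Int × Int × Int) (stop : Int × Int × Int) (step : Int × Int × Int) (out : List (Int × Int × Int)) : Decidable (Spec_trange start stop step out) := by unfold Spec_trange; infer_instance

-- ===== CLAIM (what is proved, stated in full; the proofs are below) =====
def Claim_equal_trange : Prop := ∀ (start : Int × Int × Int) (stop : Int × Int × Int) (step : Int × Int × Int), Dom_trange start stop step → Pre_trange start stop step → Spec_trange start stop step (trange start stop step)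

-- ===== LEMMAS AND PROOFS =====

lemma trangeLoop_of_guard_false (fuel : Nat) (stop step a : Int × Int × Int)
    (h : pvLexLt a stop = false) : trangeLoop fuel stop step a = [] := by
  cases fuel with
  | zero => rfl
  | succ f => simp [trangeLoop, h]

lemma trangeAltLoop_of_guard_false (fuel : Nat) (stop : Int × Int × Int) (s t : Int)
    (h : pvLexLt (pvTriple t) stop = false) : trangeAltLoop fuel stop s t = [] := by
  cases fuel with
  | zero => rfl
  | succ f => simp [trangeAltLoop, h]

lemma pvTriple_eq (t : Int) :
    pvTriple t = (t / 3600, t % 3600 / 60, t % 3600 % 60) := by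
  simp [pvTriple]

lemma pvTriple_total (a : Int × Int × Int) (h : pvNorm a) : pvTriple (pvTotal a) = a := by
  obtain ⟨a1, a2, a3⟩ := a
  simp only [pvNorm] at h
  obtain ⟨h1, h2, h3, h4, h5, h6⟩ := h
  rw [pvTriple_eq]
  simp only [pvTotal, Prod.mk.injEq]
  refine ⟨?_, ?_, ?_⟩ <;> omega

lemma trangeStep_total (step : Int × Int × Int) (hs : pvNorm step) (t : Int)
    (h0 : 0 ≤ t) (h1 : t < 86400) :
    trangeStep step (pvTriple t) = pvTriple ((t + pvTotal step) % 86400) := by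
  obtain ⟨s1, s2, s3⟩ := step
  simp only [pvNorm] at hs
  obtain ⟨g1, g2, g3, g4, g5, g6⟩ := hs
  rw [pvTriple_eq, pvTriple_eq]
  simp only [trangeStep, pvTotal]
  split_ifs <;> simp only [Prod.mk.injEq] <;> refine ⟨by omega, by omega, by omega⟩

lemma loop_eq (step : Int × Int × Int) (hs : pvNorm step) (fuel : Nat) :
    ∀ (t : Int) (stop : Int × Int × Int), 0 ≤ t → t < 86400 →
      trangeLoop fuel stop step (pvTriple t) = trangeAltLoop fuel stop (pvTotal step) t := by
  induction fuel with
  | zero => intro t stop _ _; rfl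
  | succ f ih =>
      intro t stop h0 h1
      simp only [trangeLoop, trangeAltLoop]
      by_cases hg : pvLexLt (pvTriple t) stop = true
      · simp only [hg, if_true]
        have hmod : PySem.Int.mod (t + pvTotal step) 86400 = (t + pvTotal step) % 86400 :=
          PySem.Int.mod_eq_emod_of_pos (by norm_num)
        rw [hmod, trangeStep_total step hs t h0 h1]
        have e1 : 0 ≤ (t + pvTotal step) % 86400 := Int.emod_nonneg _ (by norm_num)
        have e2 : (t + pvTotal step) % 86400 < 86400 := Int.emod_lt_of_pos _ (by norm_num)
        rw [ih _ stop e1 e2]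
      · simp only [Bool.not_eq_true] at hg
        simp [hg]

lemma mod_day_of_norm (a : Int × Int × Int) (h : pvNorm a) :
    PySem.Int.mod (pvTotal a) 86400 = pvTotal a := by
  simp only [pvNorm] at h
  rw [PySem.Int.mod_eq_emod_of_pos (by norm_num)]
  exact Int.emod_eq_of_lt (by simp only [pvTotal]; omega) (by simp only [pvTotal]; omega)

-- ===== VERDICT (by name: the statement is the Claim_ definition above) =====
theorem trange_spec : Claim_equal_trange := by
  intro start stop step _ hpre
  unfold Spec_trange
  rcases hpre with ⟨hA, hB⟩ | ⟨hstart, hstep, _⟩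
  · rw [trange, trange_alt, trangeLoop_of_guard_false _ _ _ _ hA,
        trangeAltLoop_of_guard_false]
    exact hB
  · have hb := hstart
    simp only [pvNorm] at hb
    have h0 : 0 ≤ pvTotal start := by simp only [pvTotal]; omega
    have h1 : pvTotal start < 86400 := by simp only [pvTotal]; omega
    show trangeLoop 90000 stop step start = trangeAltLoop 90000 stop
      (PySem.Int.mod (step.1 * 3600 + step.2.1 * 60 + step.2.2) 86400)
      (start.1 * 3600 + start.2.1 * 60 + start.2.2)
    have hsmod : PySem.Int.mod (step.1 * 3600 + step.2.1 * 60 + step.2.2) 86400 = pvTotal step :=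
      mod_day_of_norm step hstep
    rw [hsmod]
    have : (start.1 * 3600 + start.2.1 * 60 + start.2.2) = pvTotal start := rfl
    rw [this]
    conv_lhs => rw [← pvTriple_total start hstart]
    exact loop_eq step hstep 90000 _ stop h0 h1
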